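-- pv_equiv track=rewrite | github.com/ryon1002/coop_pomdp | run.py | _make_belief
-- ===== SOURCE A (Python) =====
-- def _make_belief(dim, n_max):
--     if dim == 2:
--         for i in range(n_max):
--             yield [i, n_max - i]
--     else:
--         for i in range(n_max):
--             for rest in _make_belief(dim - 1, n_max - i):
--                 yield [i] + rest
-- ===== SOURCE B (Python) =====
-- def _make_belief(dim, n_max):
--     stack = [([], dim, n_max)]
--     while stack:
--         prefix, d, n = stack.pop()
--         if d == 2:
--             for i in range(n):
--                 yield prefix + [i, n - i]
--         else:
--             for i in reversed(range(n)):
--                 stack.append((prefix + [i], d - 1, n - i))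
-- ===== Notes on version B (the rewrite author's own statement) =====
-- stated objective: alternative
-- what changed: Replaces A's recursive generator with an explicit-stack DFS over (prefix, dim_left, n_left) frames, pushing children in reverse so LIFO pops reproduce A's exact yield order.
import Mathlib
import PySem

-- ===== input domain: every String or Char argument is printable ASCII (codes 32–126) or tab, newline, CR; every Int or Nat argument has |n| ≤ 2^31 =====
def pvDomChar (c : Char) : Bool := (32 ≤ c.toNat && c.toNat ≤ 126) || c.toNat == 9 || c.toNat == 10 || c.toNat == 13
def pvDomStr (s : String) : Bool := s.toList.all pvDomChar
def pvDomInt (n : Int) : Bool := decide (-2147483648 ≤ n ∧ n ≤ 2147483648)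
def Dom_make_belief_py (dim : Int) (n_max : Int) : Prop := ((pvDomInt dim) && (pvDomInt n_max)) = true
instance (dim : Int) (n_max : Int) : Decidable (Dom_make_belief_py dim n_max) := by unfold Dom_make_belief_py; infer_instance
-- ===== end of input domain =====

-- B replaces A's recursive generator by an explicit-stack DFS (frames (prefix, dim_left, n_left),
-- children pushed in reverse to keep A's yield order): same output, alternative decomposition.

-- ===== PORT A =====
-- A's recursion decreases dim by 1 per level; fuel dim.toNat + 1 exceeds the recursion depth
-- for every input where the Python terminates (dim ≥ 2, or n_max ≤ 0 where the ranges are empty),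
-- so the port is exact on Pre_.
def mbA : Nat → Int → Int → List (List Int)
  | 0, _, _ => []
  | fuel + 1, dim, n_max =>
    if dim = 2 then
      (PySem.List.pyRange 0 n_max 1).map (fun i => [i, n_max - i])
    else
      (PySem.List.pyRange 0 n_max 1).flatMap (fun i =>
        (mbA fuel (dim - 1) (n_max - i)).map (fun rest => [i] ++ rest))

def make_belief_py (dim : Int) (n_max : Int) : List (List Int) :=
  mbA (dim.toNat + 1) dim n_max

-- ===== PORT B =====
-- Number of stack pops Source B's loop performs for a frame with dim_left = k + 2 and budget n
-- (used only as a fuel bound for the stack machine below).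
def mbCost : Nat → Int → Nat
  | 0, _ => 1
  | k + 1, n => 1 + ((PySem.List.pyRange 0 n 1).map (fun i => mbCost k (n - i))).sum

-- The explicit-stack loop of Source B: pop a frame, either emit the dim_left = 2 row block or push
-- the children frames in reverse (head of the list = top of the stack, restoring ascending i).
-- Fuel bounds the number of pops; mbFuel below is exact on Pre_.
def mbB : Nat → List (List Int × Int × Int) → List (List Int)
  | 0, _ => []
  | _ + 1, [] => []
  | fuel + 1, (pfx, d, n) :: rest =>
    if d = 2 then
      ((PySem.List.pyRange 0 n 1).map (fun i => pfx ++ [i, n - i])) ++ mbB fuel rest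
    else
      mbB fuel (((PySem.List.pyRange 0 n 1).reverse).foldl
        (fun st i => (pfx ++ [i], d - 1, n - i) :: st) rest)

def mbFuel (dim : Int) (n_max : Int) : Nat :=
  if 2 ≤ dim then mbCost (dim - 2).toNat n_max else 1

def make_belief_py_alt (dim : Int) (n_max : Int) : List (List Int) :=
  mbB (mbFuel dim n_max) [([], dim, n_max)]

-- ===== PRECONDITION & SPEC =====
-- For dim < 2 and n_max ≥ 1 the Python A recurses with dim decreasing forever and raises
-- RecursionError (B's loop likewise never terminates); Pre_ excludes exactly those inputs.
def Pre_make_belief_py (dim : Int) (n_max : Int) : Prop := 2 ≤ dim ∨ n_max ≤ 0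
instance (dim : Int) (n_max : Int) : Decidable (Pre_make_belief_py dim n_max) := by
  unfold Pre_make_belief_py; infer_instance

def pvWitness_make_belief_py : Int × Int := (3, 4)

def Spec_make_belief_py (dim : Int) (n_max : Int) (out : List (List Int)) : Prop := out = make_belief_py_alt dim n_max
instance (dim : Int) (n_max : Int) (out : List (List Int)) : Decidable (Spec_make_belief_py dim n_max out) := by unfold Spec_make_belief_py; infer_instance

-- ===== CLAIM (what is proved, stated in full; the proofs are below) =====
def Claim_equal_make_belief_py : Prop := ∀ (dim : Int) (n_max : Int), Dom_make_belief_py dim n_max → Pre_make_belief_py dim n_max → Spec_make_belief_py dim n_max (make_belief_py dim n_max)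

-- ===== LEMMAS AND PROOFS =====

theorem pyRange_nil (n : Int) (hn : n ≤ 0) : PySem.List.pyRange 0 n 1 = [] := by
  rw [PySem.List.pyRange_one]
  simp
  omega

-- Reference form of the enumeration, indexed by k = dim - 2, with explicit prefix.
def mbRef : Nat → List Int → Int → List (List Int)
  | 0, p, n => (PySem.List.pyRange 0 n 1).map (fun i => p ++ [i, n - i])
  | k + 1, p, n => (PySem.List.pyRange 0 n 1).flatMap (fun i => mbRef k (p ++ [i]) (n - i))

theorem mbRef_prefix (k : Nat) (p q : List Int) (n : Int) :
    mbRef k (p ++ q) n = (mbRef k q n).map (fun r => p ++ r) := by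
  induction k generalizing q n with
  | zero => simp [mbRef, List.map_map, Function.comp_def, List.append_assoc]
  | succ k ih =>
      simp only [mbRef, List.map_flatMap]
      refine List.flatMap_congr ?_
      intro i _
      rw [List.append_assoc, ih]

theorem mbA_eq_mbRef (k : Nat) : ∀ (fuel : Nat) (dim n : Int), dim = (k : Int) + 2 →
    k < fuel → mbA fuel dim n = mbRef k [] n := by
  induction k with
  | zero =>
      intro fuel dim n hd hf
      cases fuel with
      | zero => omega
      | succ f =>
          subst hd
          simp [mbA, mbRef]
  | succ k ih =>
      intro fuel dim n hd hf
      cases fuel with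
      | zero => omega
      | succ f =>
          subst hd
          have hne : (((k + 1 : Nat) : Int) + 2) ≠ 2 := by push_cast; omega
          simp only [mbA, if_neg hne, mbRef]
          refine List.flatMap_congr ?_
          intro i _
          have h1 : mbA f (((k : Nat) + 1 : Int) + 2 - 1) (n - i) = mbRef k [] (n - i) := by
            apply ih <;> omega
          push_cast
          rw [h1]
          have h2 := mbRef_prefix k [i] [] (n - i)
          simp only [List.append_nil] at h2
          simp only [List.nil_append, h2]

-- Output, cost and well-formedness of a single frame.
def mbFrameOut (fr : List Int × Int × Int) : List (List Int) :=
  if 2 ≤ fr.2.1 then mbRef (fr.2.1 - 2).toNat fr.1 fr.2.2 else []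

def mbFrameCost (fr : List Int × Int × Int) : Nat :=
  if 2 ≤ fr.2.1 then mbCost (fr.2.1 - 2).toNat fr.2.2 else 1

def mbGood (fr : List Int × Int × Int) : Prop := 2 ≤ fr.2.1 ∨ fr.2.2 ≤ 0

theorem mbCost_pos (k : Nat) (n : Int) : 1 ≤ mbCost k n := by
  cases k <;> simp [mbCost]

theorem mbFrameCost_pos (fr : List Int × Int × Int) : 1 ≤ mbFrameCost fr := by
  unfold mbFrameCost
  split
  · exact mbCost_pos _ _
  · exact Nat.le_refl 1

theorem mbCost_nonpos (k : Nat) (n : Int) (hn : n ≤ 0) : mbCost k n = 1 := by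
  cases k <;> simp [mbCost, pyRange_nil n hn]

theorem mbRef_nonpos (k : Nat) (p : List Int) (n : Int) (hn : n ≤ 0) : mbRef k p n = [] := by
  cases k <;> simp [mbRef, pyRange_nil n hn]

theorem foldl_push (f : Int → List Int × Int × Int) :
    ∀ (l : List Int) (acc : List (List Int × Int × Int)),
      l.foldl (fun st i => f i :: st) acc = l.reverse.map f ++ acc := by
  intro l
  induction l with
  | nil => intro acc; simp
  | cons x xs ih => intro acc; simp [List.foldl_cons, ih]

-- Main stack-machine invariant: with enough fuel, the DFS emits the concatenation of the
-- per-frame outputs, in stack order.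
theorem mbB_eq (fuel : Nat) : ∀ (st : List (List Int × Int × Int)),
    (∀ fr ∈ st, mbGood fr) → (st.map mbFrameCost).sum ≤ fuel →
    mbB fuel st = (st.map mbFrameOut).flatten := by
  induction fuel with
  | zero =>
      intro st hg hc
      cases st with
      | nil => simp [mbB]
      | cons fr rest =>
          exfalso
          have := mbFrameCost_pos fr
          simp only [List.map_cons, List.sum_cons] at hc
          omega
  | succ fuel ih =>
      intro st hg hc
      cases st with
      | nil => simp [mbB]
      | cons fr rest =>
          obtain ⟨p, d, n⟩ := fr
          by_cases hd : d = 2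
          · subst hd
            have hcost : mbFrameCost (p, 2, n) = 1 := by
              simp [mbFrameCost, mbCost]
            simp only [List.map_cons, List.sum_cons, hcost] at hc
            have hrest := ih rest (fun f hf => hg f (List.mem_cons_of_mem _ hf)) (by omega)
            simp [mbB, hrest, mbFrameOut, mbRef]
          · have hchild : ((PySem.List.pyRange 0 n 1).reverse).foldl
                (fun st i => (p ++ [i], d - 1, n - i) :: st) rest
                = (PySem.List.pyRange 0 n 1).map (fun i => (p ++ [i], d - 1, n - i)) ++ rest := by
              rw [foldl_push]
              simp
            by_cases hn : n ≤ 0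
            · -- no children; the frame contributes nothing
              have hr := pyRange_nil n hn
              have hcost : mbFrameCost (p, d, n) = 1 := by
                unfold mbFrameCost
                split
                · exact mbCost_nonpos _ _ hn
                · rfl
              simp only [List.map_cons, List.sum_cons, hcost] at hc
              have hrest := ih rest (fun f hf => hg f (List.mem_cons_of_mem _ hf)) (by omega)
              have hout : mbFrameOut (p, d, n) = [] := by
                unfold mbFrameOut
                split
                · exact mbRef_nonpos _ _ _ hn
                · rfl
              simp only [mbB, if_neg hd, hr, List.reverse_nil, List.foldl_nil, hrest,
                List.map_cons, List.flatten_cons, hout, List.nil_append]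
            · -- children exist: d ≥ 3 from goodness
              have hd3 : 3 ≤ d := by
                have := hg (p, d, n) List.mem_cons_self
                unfold mbGood at this
                simp at this
                omega
              obtain ⟨k, hk⟩ : ∃ k, (d - 2).toNat = k + 1 :=
                ⟨(d - 3).toNat, by omega⟩
              have hk' : (d - 1 - 2).toNat = k := by omega
              have hcost : mbFrameCost (p, d, n)
                  = 1 + ((PySem.List.pyRange 0 n 1).map (fun i => mbCost k (n - i))).sum := by
                unfold mbFrameCost
                simp only
                rw [if_pos (by omega : (2:Int) ≤ d), hk]
                rfl
              have hchildcost : ∀ i : Int,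
                  mbFrameCost (p ++ [i], d - 1, n - i) = mbCost k (n - i) := by
                intro i
                unfold mbFrameCost
                simp only
                rw [if_pos (by omega : (2:Int) ≤ d - 1), hk']
              have hcsum : ((((PySem.List.pyRange 0 n 1).map
                    (fun i => (p ++ [i], d - 1, n - i)) ++ rest)).map mbFrameCost).sum ≤ fuel := by
                simp only [List.map_cons, List.sum_cons, hcost] at hc
                simp only [List.map_append, List.sum_append, List.map_map, Function.comp_def,
                  hchildcost]
                omega
              have hgood : ∀ f ∈ (PySem.List.pyRange 0 n 1).map
                  (fun i => (p ++ [i], d - 1, n - i)) ++ rest, mbGood f := by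
                intro f hf
                rcases List.mem_append.mp hf with hf | hf
                · obtain ⟨i, _, rfl⟩ := List.mem_map.mp hf
                  unfold mbGood
                  left
                  simp only
                  omega
                · exact hg f (List.mem_cons_of_mem _ hf)
              have hrec := ih _ hgood hcsum
              have hcout : ∀ i : Int,
                  mbFrameOut (p ++ [i], d - 1, n - i) = mbRef k (p ++ [i]) (n - i) := by
                intro i
                unfold mbFrameOut
                simp only
                rw [if_pos (by omega : (2:Int) ≤ d - 1), hk']
              have hout : mbFrameOut (p, d, n)
                  = (PySem.List.pyRange 0 n 1).flatMap (fun i => mbRef k (p ++ [i]) (n - i)) := by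
                unfold mbFrameOut
                simp only
                rw [if_pos (by omega : (2:Int) ≤ d), hk]
                rfl
              simp only [mbB, if_neg hd, hchild, hrec, List.map_append, List.flatten_append,
                List.map_map, Function.comp_def, List.map_cons, List.flatten_cons, hout]
              congr 1
              rw [List.flatMap]
              congr 1
              exact List.map_congr_left (fun i _ => hcout i)

-- ===== VERDICT (by name: the statement is the Claim_ definition above) =====
theorem make_belief_py_spec : Claim_equal_make_belief_py := by
  intro dim n_max _ hpre
  unfold Spec_make_belief_py make_belief_py make_belief_py_alt mbFuel
  have hB : mbB (if 2 ≤ dim then mbCost (dim - 2).toNat n_max else 1) [([], dim, n_max)]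
      = mbFrameOut ([], dim, n_max) := by
    have h := mbB_eq (if 2 ≤ dim then mbCost (dim - 2).toNat n_max else 1) [([], dim, n_max)]
      (by intro fr hfr; simp at hfr; subst hfr; exact hpre)
      (by
        simp only [List.map_cons, List.map_nil, List.sum_cons, List.sum_nil, Nat.add_zero]
        unfold mbFrameCost
        simp only
        split
        · exact Nat.le_refl _
        · exact Nat.le_refl _)
    simpa using h
  rw [hB]
  by_cases hd : 2 ≤ dim
  · have hA := mbA_eq_mbRef (dim - 2).toNat (dim.toNat + 1) dim n_max (by omega) (by omega)
    rw [hA]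
    unfold mbFrameOut
    simp only
    rw [if_pos hd]
  · have hn : n_max ≤ 0 := by
      rcases hpre with h | h
      · omega
      · exact h
    have hr := pyRange_nil n_max hn
    unfold mbFrameOut
    simp only
    rw [if_neg hd]
    cases hdim2 : dim.toNat + 1 with
    | zero => omega
    | succ f => simp [mbA, hr]
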